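-- pv_equiv track=rewrite | github.com/MenachemJacobs/InternNetworkExploration | shuffle/utils.py | parse_char_to_string_list
-- ===== SOURCE A (Python) =====
-- def parse_char_to_string_list(char_list: list[chr]) -> list[str]:
--     wordlist = []
--     word = ''
--
--     for char in char_list:
--         if char == ',':
--             wordlist.append(word)
--             word = ''
--         elif char not in '()[]\' ':
--             word += char
--     if word:
--         wordlist.append(word)
--
--     return wordlist
-- ===== SOURCE B (Python) =====
-- def parse_char_to_string_list(char_list: list[chr]) -> list[str]:
--     # Pass 1: keep commas and every token that is not (a substring of) "()[]' ".
--     kept = [c for c in char_list if c == ',' or c not in "()[]' "]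
--     # Pass 2: repeatedly split off the part before the first comma.
--     words = []
--     while ',' in kept:
--         i = kept.index(',')
--         words.append(''.join(kept[:i]))
--         kept = kept[i + 1:]
--     tail = ''.join(kept)
--     if tail:
--         words.append(tail)
--     return words
-- ===== Notes on version B (the rewrite author's own statement) =====
-- stated objective: alternative
-- what changed: Replaces A's single stateful per-character loop (mutable current word + append-on-comma) with two separate passes: a filter comprehension dropping bracket/quote/space tokens, then library-based splitting (list.index on ',' + slicing + ''.join per segment) with one final non-empty-tail append.
import Mathlib
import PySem

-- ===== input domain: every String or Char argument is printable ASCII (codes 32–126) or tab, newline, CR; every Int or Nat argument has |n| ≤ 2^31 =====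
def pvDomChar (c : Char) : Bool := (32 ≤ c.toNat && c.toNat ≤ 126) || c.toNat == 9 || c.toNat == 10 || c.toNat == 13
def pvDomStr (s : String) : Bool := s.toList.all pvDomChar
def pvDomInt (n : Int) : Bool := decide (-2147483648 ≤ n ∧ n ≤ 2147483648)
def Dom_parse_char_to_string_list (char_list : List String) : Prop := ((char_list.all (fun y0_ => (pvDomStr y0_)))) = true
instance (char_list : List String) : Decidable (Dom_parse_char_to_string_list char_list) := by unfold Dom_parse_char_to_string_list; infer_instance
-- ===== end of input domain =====

-- B replaces A's stateful per-character loop by a filter pass followed by library splitting on ',' (alternative decomposition, same result).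

-- ===== PORT A =====
-- one step of A's for-loop over state (wordlist, word)
def pcsStep (st : List String × String) (c : String) : List String × String :=
  if c == "," then (st.1 ++ [st.2], "")
  else if PySem.Str.isIn c "()[]' " then st
  else (st.1, st.2 ++ c)

def parse_char_to_string_list (char_list : List String) : List String :=
  let st := char_list.foldl pcsStep ([], "")
  if st.2 ≠ "" then st.1 ++ [st.2] else st.1

-- ===== PORT B =====
-- the filter of Source B's comprehension: keep ',' and anything not in "()[]' "
def keepTok (c : String) : Bool := c == "," || !(PySem.Str.isIn c "()[]' ")

-- Source B's while-loop: split off the part before the first ',' until no comma is left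
def splitTokens (words kept : List String) : List String :=
  match h : PySem.List.index? kept "," with
  | some i => splitTokens (words ++ [PySem.Str.join "" (kept.take i)]) (kept.drop (i + 1))
  | none =>
    let tail := PySem.Str.join "" kept
    if tail ≠ "" then words ++ [tail] else words
termination_by kept.length
decreasing_by
  obtain ⟨hi, -, -⟩ := PySem.List.getElem_of_index?_eq_some h
  simp only [List.length_drop]; omega

def parse_char_to_string_list_alt (char_list : List String) : List String :=
  splitTokens [] (char_list.filter keepTok)

-- ===== PRECONDITION & SPEC =====
def Spec_parse_char_to_string_list (char_list : List String) (out : List String) : Prop := out = parse_char_to_string_list_alt char_list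
instance (char_list : List String) (out : List String) : Decidable (Spec_parse_char_to_string_list char_list out) := by unfold Spec_parse_char_to_string_list; infer_instance

-- ===== CLAIM (what is proved, stated in full; the proofs are below) =====
def Claim_equal_parse_char_to_string_list : Prop := ∀ (char_list : List String), Dom_parse_char_to_string_list char_list → Spec_parse_char_to_string_list char_list (parse_char_to_string_list char_list)

-- ===== LEMMAS AND PROOFS =====

-- reference: the word list produced from current word w and the remaining (already filtered) tokens
def specWords (w : String) : List String → List String
  | [] => if w ≠ "" then [w] else []
  | c :: rest => if c == "," then w :: specWords "" rest else specWords (w ++ c) rest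

theorem specWords_comma_cons (w : String) (rest : List String) :
    specWords w ("," :: rest) = w :: specWords "" rest := by simp [specWords]

theorem specWords_cons (c w : String) (rest : List String) (hc : c ≠ ",") :
    specWords w (c :: rest) = specWords (w ++ c) rest := by simp [specWords, hc]

theorem chars_join_empty_cons (a : List Char) (rest : List (List Char)) :
    PySem.Chars.join [] (a :: rest) = a ++ PySem.Chars.join [] rest := by
  cases rest with
  | nil => simp [PySem.Chars.join_singleton, PySem.Chars.join_nil]
  | cons b r => rw [PySem.Chars.join_cons_cons]; simp

theorem join_empty_nil : PySem.Str.join "" ([] : List String) = "" := by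
  apply String.toList_inj.mp
  simp [PySem.Str.toList_join, PySem.Chars.join_nil]

theorem join_empty_cons (c : String) (l : List String) :
    PySem.Str.join "" (c :: l) = c ++ PySem.Str.join "" l := by
  apply String.toList_inj.mp
  simp [PySem.Str.toList_join, chars_join_empty_cons]

theorem foldl_pcsStep (l : List String) (acc : List String) (w : String) :
    (let st := l.foldl pcsStep (acc, w);
     if st.2 ≠ "" then st.1 ++ [st.2] else st.1) = acc ++ specWords w (l.filter keepTok) := by
  induction l generalizing acc w with
  | nil =>
    simp only [List.foldl_nil, List.filter_nil, specWords]
    split <;> simp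
  | cons c rest ih =>
    by_cases hc : c = ","
    · subst hc
      have hstep : pcsStep (acc, w) "," = (acc ++ [w], "") := by
        simp only [pcsStep]; rw [if_pos (by simp)]
      have hk : keepTok "," = true := by simp [keepTok]
      rw [List.foldl_cons, hstep, List.filter_cons]
      rw [ih]
      simp [hk, specWords_comma_cons]
    · by_cases hin : PySem.Str.isIn c "()[]' " = true
      · have hstep : pcsStep (acc, w) c = (acc, w) := by
          simp only [pcsStep]; rw [if_neg (by simp [hc]), if_pos hin]
        have hk : keepTok c = false := by
          simp only [keepTok]; rw [hin]; simp [hc]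
        rw [List.foldl_cons, hstep, List.filter_cons]
        simpa [hk] using ih acc w
      · have hin' : PySem.Str.isIn c "()[]' " = false := by simpa using hin
        have hstep : pcsStep (acc, w) c = (acc, w ++ c) := by
          simp only [pcsStep]; rw [if_neg (by simp [hc]), if_neg (by rw [hin']; simp)]
        have hk : keepTok c = true := by
          simp only [keepTok]; rw [hin']; simp
        rw [List.foldl_cons, hstep, List.filter_cons]
        rw [ih]
        simp [hk, specWords_cons _ _ _ hc]

theorem specWords_no_comma (pre : List String) (w : String) (h : "," ∉ pre) :
    specWords w pre =
      (if w ++ PySem.Str.join "" pre ≠ "" then [w ++ PySem.Str.join "" pre] else []) := by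
  induction pre generalizing w with
  | nil => simp [specWords, join_empty_nil]
  | cons c rest ih =>
    have hc : c ≠ "," := fun hh => h (hh ▸ List.mem_cons_self ..)
    rw [specWords_cons _ _ _ hc, ih (w ++ c) (fun hh => h (List.mem_cons_of_mem _ hh)), join_empty_cons]
    simp [String.append_assoc]

theorem specWords_comma (pre suf : List String) (w : String) (h : "," ∉ pre) :
    specWords w (pre ++ "," :: suf) = (w ++ PySem.Str.join "" pre) :: specWords "" suf := by
  induction pre generalizing w with
  | nil => simp [specWords_comma_cons, join_empty_nil]
  | cons c rest ih =>
    have hc : c ≠ "," := fun hh => h (hh ▸ List.mem_cons_self ..)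
    rw [List.cons_append, specWords_cons _ _ _ hc,
      ih _ (fun hh => h (List.mem_cons_of_mem _ hh)), join_empty_cons]
    simp [String.append_assoc]

theorem splitTokens_eq (words kept : List String) :
    splitTokens words kept = words ++ specWords "" kept := by
  induction words, kept using splitTokens.induct with
  | case1 words kept i h ih =>
    obtain ⟨pre, suf, hkk, hlen, hpre⟩ := (PySem.List.index?_eq_some_iff kept "," i).mp h
    subst hlen
    have htake : List.take pre.length kept = pre := by
      rw [hkk]; exact List.take_left ..
    have hdrop : List.drop (pre.length + 1) kept = suf := by
      rw [hkk, show pre ++ "," :: suf = (pre ++ [","]) ++ suf by simp]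
      exact List.drop_left' (by simp)
    rw [splitTokens]
    split
    · next i' heq =>
      rw [h] at heq
      obtain rfl : pre.length = i' := Option.some.inj heq
      rw [ih, htake, hdrop, hkk, specWords_comma pre suf "" hpre]
      simp
    · next heq =>
      rw [h] at heq
      simp at heq
  | case2 words kept h =>
    rw [splitTokens]
    split
    · next i heq =>
      rw [h] at heq
      simp at heq
    · next heq =>
      rw [specWords_no_comma kept "" ((PySem.List.index?_eq_none_iff kept ",").mp h)]
      by_cases ht : PySem.Str.join "" kept = "" <;> simp [ht]
  | case3 words kept h tail ht =>
    rw [splitTokens]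
    split
    · next i heq =>
      rw [h] at heq
      simp at heq
    · next heq =>
      rw [specWords_no_comma kept "" ((PySem.List.index?_eq_none_iff kept ",").mp h)]
      by_cases hj : PySem.Str.join "" kept = "" <;> simp [hj]

-- ===== VERDICT (by name: the statement is the Claim_ definition above) =====
theorem parse_char_to_string_list_spec : Claim_equal_parse_char_to_string_list := by
  intro char_list _
  unfold Spec_parse_char_to_string_list parse_char_to_string_list parse_char_to_string_list_alt
  rw [splitTokens_eq]
  simpa using foldl_pcsStep char_list [] ""
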